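-- pv_equiv track=rewrite | github.com/edwinko-alt/Steganography-Web-App | decoder.py | decode_chars
-- ===== SOURCE A (Python) =====
-- def even_or_odd_bit(num: int) -> str:
--     """
--     Consumes an integer and returns a '1' or '0', deprending on the parity of the number
--
--     Args:
--         num (int): A passed integer
--
--     Returns:
--         str: Either a '0' (even) or '1' (odd)
--     """
--     if num % 2 == 0:
--         return '0'
--     return '1'
--
-- def decode_single_char(intensities: list[int]) -> str:
--     """
--     Consumes a list of eight integers containing color intensities and returns the ASCII character represented by the intensities
--
--     Args:
--         intensites (list[int]): A list of integers representing color intensities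
--
--     Returns:
--         str: ASCII character represented by the intensities
--     """
--     binary = ''
--
--     if not intensities or len(intensities) < 8:
--         return binary
--
--     for number in intensities:
--         binary = binary + even_or_odd_bit(number)
--
--     #Converts the binary value to ASCII (the 2 means Base 2 (binary))
--     ascii = int(binary, 2)
--
--     return chr(ascii)
--
-- def decode_chars(intensities: list[int], characters: int) ->str:
--     """
--     Consumes a list integers representing color intensities and an integer representing the number of characters
--     to decode. It returns a string representing the decoded characters
--
--     Args:
--         intensites (list[int]): A list of integers representing color intensities
--         characters (int): An integer representing the number of characters to decode
--
--     Returns: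
--         str: A string representing the decoded message with a certain amount of characters
--     """
--
--     #check if it's possible to decode a certain amount of characters
--     if len(intensities) != characters * 8:
--         return None
--
--     message = ''
--     modified_intensities = []
--     for index in (range(len(intensities) // 8)):
--
--         #decomposes the list of intensities into a list of lists made up of eight element lists
--         first_index = index * 8
--         last_index = (index *8) + 8
--         modified_intensities.append(intensities[first_index:last_index])
--
--     for intensity in modified_intensities:
--         message = message + decode_single_char(intensity)
--
--     return message
-- ===== SOURCE B (Python) =====
-- def decode_chars(intensities: list[int], characters: int) -> str:
--     if len(intensities) != characters * 8:
--         return None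
--     chars = []
--     code = 0
--     count = 0
--     for num in intensities:
--         code = code * 2 + num % 2
--         count += 1
--         if count == 8:
--             chars.append(chr(code))
--             code = 0
--             count = 0
--     return ''.join(chars)
-- ===== Notes on version B (the rewrite author's own statement) =====
-- stated objective: simpler
-- what changed: Replaces A's two-phase build (list of 8-element slices, then per-chunk binary string + int(,2) parsing) with one arithmetic pass folding each parity bit into an integer accumulator (code = code*2 + num%2) and emitting chr(code) every 8 bits.
import Mathlib
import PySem

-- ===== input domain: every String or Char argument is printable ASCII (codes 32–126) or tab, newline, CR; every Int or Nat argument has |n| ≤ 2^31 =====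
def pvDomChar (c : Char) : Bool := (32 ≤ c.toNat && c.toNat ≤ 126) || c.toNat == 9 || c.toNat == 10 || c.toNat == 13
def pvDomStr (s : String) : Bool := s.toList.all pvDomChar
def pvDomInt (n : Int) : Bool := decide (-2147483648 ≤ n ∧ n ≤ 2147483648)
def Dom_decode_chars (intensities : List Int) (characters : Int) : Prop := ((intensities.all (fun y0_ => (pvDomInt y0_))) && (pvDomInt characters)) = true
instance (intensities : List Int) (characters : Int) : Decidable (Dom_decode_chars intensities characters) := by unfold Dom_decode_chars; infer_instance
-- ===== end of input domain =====

-- B replaces A's slice-list + binary-string + int(,2) pipeline by one arithmetic pass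
-- with an integer accumulator (objective: simpler; same O(n) cost).

-- ===== PORT A =====
def pv_even_or_odd_bit (num : Int) : String :=
  if PySem.Int.mod num 2 = 0 then "0" else "1"

def pv_decode_single_char (intensities : List Int) : String :=
  let binary := ""
  if intensities.isEmpty || intensities.length < 8 then binary
  else
    let binary := intensities.foldl (fun b n => b ++ pv_even_or_odd_bit n) binary
    -- int(binary, 2); here binary is a nonempty string of '0'/'1' so the parse
    -- always succeeds and the .getD 0 default is unreachable
    let ascii := (PySem.Int.ofStrBase? binary 2).getD 0
    -- chr(ascii); exact since 0 ≤ ascii ≤ 255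
    String.ofList [Char.ofNat ascii.toNat]

def decode_chars (intensities : List Int) (characters : Int) : Option String :=
  if (intensities.length : Int) ≠ characters * 8 then none
  else
    let message := ""
    let modified_intensities :=
      (PySem.List.pyRange 0 (PySem.Int.floordiv (intensities.length : Int) 8) 1).foldl
        (fun acc index =>
          let first_index := index * 8
          let last_index := index * 8 + 8
          acc ++ [PySem.List.slice intensities (some first_index) (some last_index)]) []
    some (modified_intensities.foldl (fun m c => m ++ pv_decode_single_char c) message)

-- ===== PORT B =====
def pv_alt_step (s : Int × Int × List Char) (num : Int) : Int × Int × List Char :=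
  let code := s.1 * 2 + PySem.Int.mod num 2
  let count := s.2.1 + 1
  if count = 8 then (0, 0, s.2.2 ++ [Char.ofNat code.toNat])
  else (code, count, s.2.2)

def decode_chars_alt (intensities : List Int) (characters : Int) : Option String :=
  if (intensities.length : Int) ≠ characters * 8 then none
  else
    let s := intensities.foldl pv_alt_step (0, 0, [])
    some (String.ofList s.2.2)

-- ===== PRECONDITION & SPEC =====
def Spec_decode_chars (intensities : List Int) (characters : Int) (out : Option String) : Prop := out = decode_chars_alt intensities characters
instance (intensities : List Int) (characters : Int) (out : Option String) : Decidable (Spec_decode_chars intensities characters out) := by unfold Spec_decode_chars; infer_instance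

-- ===== CLAIM (what is proved, stated in full; the proofs are below) =====
def Claim_equal_decode_chars : Prop := ∀ (intensities : List Int) (characters : Int), Dom_decode_chars intensities characters → Spec_decode_chars intensities characters (decode_chars intensities characters)


-- ===== LEMMAS AND PROOFS =====

-- the 8-bit accumulator value B builds for one chunk
def pvCode8 (b1 b2 b3 b4 b5 b6 b7 b8 : Int) : Int :=
  ((((((PySem.Int.mod b1 2 * 2 + PySem.Int.mod b2 2) * 2 + PySem.Int.mod b3 2) * 2
      + PySem.Int.mod b4 2) * 2 + PySem.Int.mod b5 2) * 2 + PySem.Int.mod b6 2) * 2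
      + PySem.Int.mod b7 2) * 2 + PySem.Int.mod b8 2

theorem pv_bstep8 (b1 b2 b3 b4 b5 b6 b7 b8 : Int) (out : List Char) :
    List.foldl pv_alt_step (0, 0, out) [b1, b2, b3, b4, b5, b6, b7, b8]
      = (0, 0, out ++ [Char.ofNat (pvCode8 b1 b2 b3 b4 b5 b6 b7 b8).toNat]) := by
  simp [pv_alt_step, pvCode8]

set_option maxHeartbeats 4000000 in
theorem pv_chunk_eq (b1 b2 b3 b4 b5 b6 b7 b8 : Int) :
    pv_decode_single_char [b1, b2, b3, b4, b5, b6, b7, b8]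
      = String.ofList [Char.ofNat (pvCode8 b1 b2 b3 b4 b5 b6 b7 b8).toNat] := by
  have m : ∀ b : Int, PySem.Int.mod b 2 = 0 ∨ PySem.Int.mod b 2 = 1 := by
    intro b
    rw [PySem.Int.mod_eq_emod_of_pos (by norm_num)]
    exact Int.emod_two_eq b
  rcases m b1 with h1 | h1 <;> rcases m b2 with h2 | h2 <;> rcases m b3 with h3 | h3 <;>
    rcases m b4 with h4 | h4 <;> rcases m b5 with h5 | h5 <;> rcases m b6 with h6 | h6 <;>
    rcases m b7 with h7 | h7 <;> rcases m b8 with h8 | h8 <;>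
    (simp only [pv_decode_single_char, pv_even_or_odd_bit, pvCode8, List.foldl,
       h1, h2, h3, h4, h5, h6, h7, h8]; norm_num; all_goals decide)

theorem pv_afold_pref (l : List (List Int)) (s : String) :
    l.foldl (fun m c => m ++ pv_decode_single_char c) s
      = s ++ l.foldl (fun m c => m ++ pv_decode_single_char c) "" := by
  induction l generalizing s with
  | nil => simp
  | cons c t ih =>
    rw [List.foldl_cons, List.foldl_cons, ih, ih ("" ++ pv_decode_single_char c)]
    simp [String.append_assoc]

theorem pv_bfold_out (k : Nat) (xs : List Int) (out : List Char) (h : xs.length = 8 * k) :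
    (List.foldl pv_alt_step (0, 0, out) xs).2.2
      = out ++ (List.foldl pv_alt_step (0, 0, []) xs).2.2 := by
  induction k generalizing xs out with
  | zero =>
    have : xs = [] := List.eq_nil_of_length_eq_zero (by omega)
    subst this; simp
  | succ k ih =>
    rcases xs with _ | ⟨b1, _ | ⟨b2, _ | ⟨b3, _ | ⟨b4, _ | ⟨b5, _ | ⟨b6, _ | ⟨b7, _ | ⟨b8, rest⟩⟩⟩⟩⟩⟩⟩⟩ <;>
      simp only [List.length] at h <;> try omega
    have hr : rest.length = 8 * k := by omega
    have hsplit : b1 :: b2 :: b3 :: b4 :: b5 :: b6 :: b7 :: b8 :: rest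
        = [b1, b2, b3, b4, b5, b6, b7, b8] ++ rest := rfl
    rw [hsplit, List.foldl_append, List.foldl_append, pv_bstep8, pv_bstep8,
      ih rest (out ++ [Char.ofNat (pvCode8 b1 b2 b3 b4 b5 b6 b7 b8).toNat]) hr,
      ih rest ([] ++ [Char.ofNat (pvCode8 b1 b2 b3 b4 b5 b6 b7 b8).toNat]) hr]
    simp

theorem pv_master (k : Nat) (xs : List Int) (h : xs.length = 8 * k) :
    ((List.range k).map (fun j => (xs.drop (8 * j)).take 8)).foldl
        (fun m c => m ++ pv_decode_single_char c) ""
      = String.ofList (List.foldl pv_alt_step (0, 0, []) xs).2.2 := by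
  induction k generalizing xs with
  | zero =>
    have : xs = [] := List.eq_nil_of_length_eq_zero (by omega)
    subst this; simp
  | succ k ih =>
    rcases xs with _ | ⟨b1, _ | ⟨b2, _ | ⟨b3, _ | ⟨b4, _ | ⟨b5, _ | ⟨b6, _ | ⟨b7, _ | ⟨b8, rest⟩⟩⟩⟩⟩⟩⟩⟩ <;>
      simp only [List.length] at h <;> try omega
    have hr : rest.length = 8 * k := by omega
    have hsplit : b1 :: b2 :: b3 :: b4 :: b5 :: b6 :: b7 :: b8 :: rest
        = [b1, b2, b3, b4, b5, b6, b7, b8] ++ rest := rfl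
    -- the first chunk and the shifted remaining chunks
    rw [List.range_succ_eq_map, List.map_cons, List.map_map]
    have hchunks : (List.range k).map ((fun j => ((b1 :: b2 :: b3 :: b4 :: b5 :: b6 :: b7 :: b8 :: rest).drop (8 * j)).take 8) ∘ (fun j => j + 1))
        = (List.range k).map (fun j => (rest.drop (8 * j)).take 8) := by
      refine List.map_congr_left (fun j _ => ?_)
      have : 8 * (j + 1) = (8 * j) + 8 := by ring
      simp [Function.comp, this]
    rw [hchunks, List.foldl_cons, pv_afold_pref]
    rw [ih rest hr]
    rw [hsplit, List.foldl_append, pv_bstep8,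
      pv_bfold_out k rest ([] ++ [Char.ofNat (pvCode8 b1 b2 b3 b4 b5 b6 b7 b8).toNat]) hr]
    have hfirst : List.take 8 (List.drop (8 * 0) ([b1, b2, b3, b4, b5, b6, b7, b8] ++ rest))
        = [b1, b2, b3, b4, b5, b6, b7, b8] := by simp
    rw [hfirst, pv_chunk_eq]
    simp [← String.ofList_append]

theorem pv_A_message (xs : List Int) (k : Nat) (h : xs.length = 8 * k) :
    ((PySem.List.pyRange 0 ((k : Nat) : Int) 1).foldl
        (fun acc index => acc ++
          [PySem.List.slice xs (some (index * 8)) (some (index * 8 + 8))]) []).foldl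
      (fun m c => m ++ pv_decode_single_char c) ""
      = String.ofList (List.foldl pv_alt_step (0, 0, []) xs).2.2 := by
  have hrange : PySem.List.pyRange 0 ((k : Nat) : Int) 1
      = (List.range k).map (fun j => ((j : Nat) : Int)) := by
    rw [PySem.List.pyRange_one]
    simp only [Int.sub_zero, Int.toNat_natCast, zero_add]
  have hfold : (PySem.List.pyRange 0 ((k : Nat) : Int) 1).foldl
      (fun acc index => acc ++
        [PySem.List.slice xs (some (index * 8)) (some (index * 8 + 8))]) []
      = (List.range k).map (fun j => (xs.drop (8 * j)).take 8) := by
    rw [hrange]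
    rw [show ∀ l : List Int, List.foldl
        (fun acc index => acc ++
          [PySem.List.slice xs (some (index * 8)) (some (index * 8 + 8))]) [] l
        = l.map (fun index => PySem.List.slice xs (some (index * 8)) (some (index * 8 + 8)))
      from fun l => by
        simpa using PySem.List.foldl_append_singleton_eq_map
          (fun index => PySem.List.slice xs (some (index * 8)) (some (index * 8 + 8))) l []]
    rw [List.map_map]
    refine List.map_congr_left (fun j _ => ?_)
    have h1 : (((j : Nat) : Int) * 8) = ((8 * j : Nat) : Int) := by push_cast; ring
    have h2 : (((8 * j : Nat) : Int) + 8) = ((8 * j : Nat) : Int) + ((8 : Nat) : Int) := by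
      norm_num
    simp only [Function.comp]
    rw [h1, h2, PySem.List.slice_natCast_add]
  rw [hfold, pv_master k xs h]

-- ===== VERDICT (by name: the statement is the Claim_ definition above) =====
theorem decode_chars_spec : Claim_equal_decode_chars := by
  intro xs ch _
  unfold Spec_decode_chars decode_chars decode_chars_alt
  by_cases hg : (xs.length : Int) = ch * 8
  · have hk : xs.length = 8 * ch.toNat := by omega
    rw [if_neg (fun hc => hc hg), if_neg (fun hc => hc hg)]
    have hfd : PySem.Int.floordiv ((xs.length : Nat) : Int) 8 = ((ch.toNat : Nat) : Int) := by
      rw [PySem.Int.floordiv_eq_ediv_of_pos (by norm_num)]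
      omega
    show some (((PySem.List.pyRange 0 (PySem.Int.floordiv ((xs.length : Nat) : Int) 8) 1).foldl
        (fun acc index => acc ++
          [PySem.List.slice xs (some (index * 8)) (some (index * 8 + 8))]) []).foldl
        (fun m c => m ++ pv_decode_single_char c) "")
      = some (String.ofList (List.foldl pv_alt_step (0, 0, []) xs).2.2)
    rw [hfd]
    exact congrArg some (pv_A_message xs ch.toNat hk)
  · rw [if_pos hg, if_pos hg]
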